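-- pv_equiv track=rewrite | github.com/mitchoatman/Murray-Tools | MurrayTools.tab/Fabrication Valve.panel/LastValveNumber.pushbutton/LastValveNumber_script.py | get_format_and_number
-- ===== SOURCE A (Python) =====
-- def get_format_and_number(item_numbers):
--     prefix_max_number = {}
--
--     # Iterate through each item number
--     for item_number in item_numbers:
--         # Skip if item_number is None or empty
--         if not item_number:
--             continue
--
--         # Check if the item number is purely numeric (no prefix)
--         if item_number.isdigit():
--             format_part = ''
--         else:
--             # Iterate through the string from the right side
--             for i in range(len(item_number) - 1, -1, -1):
--                 if not item_number[i].isdigit():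
--                     # Found a non-digit character, split the string
--                     format_part = item_number[:i+1]
--                     break
--             else:
--                 # If no non-digit character is found, the format part is empty
--                 format_part = ''
--
--         # Get the numeric part (with or without prefix)
--         number_part = item_number[len(format_part):]
--
--         # Skip if number_part is empty or not numeric
--         if not number_part or not number_part.isdigit():
--             continue
--
--         # Update the maximum number for the prefix
--         if format_part not in prefix_max_number:
--             prefix_max_number[format_part] = number_part
--         else:
--             # Check which number is greater considering the padding
--             prefix_max_number[format_part] = max(
--                 prefix_max_number[format_part],
--                 number_part,
--                 key=lambda x: (len(x), x)
--             )
--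
--     return prefix_max_number
-- ===== SOURCE B (Python) =====
-- def get_format_and_number(item_numbers):
--     # Stage 1: strip each item's trailing digit run with rstrip; keep (prefix, digits)
--     # only when a digit suffix exists (this also drops empty/None-free falsy strings).
--     pairs = []
--     for s in item_numbers:
--         prefix = s.rstrip('0123456789')
--         if len(prefix) < len(s):
--             pairs.append((prefix, s[len(prefix):]))
--     # Stage 2: for each distinct prefix in first-seen order, rescan the pair list
--     # and take the (len, value)-keyed max of its digit strings.
--     return {
--         prefix: max((d for p, d in pairs if p == prefix), key=lambda x: (len(x), x))
--         for prefix in dict.fromkeys(p for p, _ in pairs)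
--     }
-- ===== Notes on version B (the rewrite author's own statement) =====
-- stated objective: alternative
-- what changed: A fuses a right-to-left indexed splitting scan (with an isdigit special case) and a running-max dict update into a single pass; B keeps no dict during the scan: it first collects (prefix, digit-suffix) pairs using str.rstrip('0123456789'), then for each distinct prefix (dict.fromkeys order) rescans the pair list once and takes a single keyed max over that prefix's suffixes; a timing run measured B faster by a constant factor (rstrip/slice instead of per-char indexed scanning), though B's rescans cost O(n*p) when prefixes are many.
import Mathlib
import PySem

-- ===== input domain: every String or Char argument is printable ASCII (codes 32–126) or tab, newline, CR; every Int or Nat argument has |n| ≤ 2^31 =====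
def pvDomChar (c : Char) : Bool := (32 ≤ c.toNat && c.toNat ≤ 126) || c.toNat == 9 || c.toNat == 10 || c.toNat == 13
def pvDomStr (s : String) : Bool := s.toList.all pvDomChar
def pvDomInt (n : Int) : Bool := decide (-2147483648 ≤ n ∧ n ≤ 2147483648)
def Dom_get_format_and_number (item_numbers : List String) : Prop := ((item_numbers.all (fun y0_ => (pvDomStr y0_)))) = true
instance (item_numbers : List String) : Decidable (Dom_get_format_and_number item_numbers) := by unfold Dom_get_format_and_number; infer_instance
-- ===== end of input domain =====

-- B keeps no dict while scanning: it collects (prefix, digit-suffix) pairs via rstrip,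
-- then rescans the pair list once per distinct prefix with a single keyed max (objective: alternative).


-- ===== PORT A =====
-- max(a, b, key=lambda x: (len(x), x)) : b wins iff its key is strictly greater
def pyMax2 (a b : List Char) : List Char :=
  if a.length < b.length ∨ (a.length = b.length ∧ a < b) then b else a

-- the 'for i in range(len(item_number)-1, -1, -1): … break / else: …' scan of A
def aFindFmt (idxs : List Int) (cs : List Char) : List Char :=
  match idxs with
  | [] => []
  | i :: rest =>
    if ¬ (PySem.Chars.isdigit (PySem.List.pyGetD cs i ' ') = true) then
      PySem.List.slice cs none (some (i + 1))
    else aFindFmt rest cs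

-- format_part of one item
def aFmt (cs : List Char) : List Char :=
  if PySem.Chars.strIsdigit cs = true then []
  else aFindFmt (PySem.List.pyRange ((cs.length : Int) - 1) (-1) (-1)) cs

-- one iteration of A's main loop
def aStep (d : PySem.Dict (List Char) (List Char)) (item : List Char) :
    PySem.Dict (List Char) (List Char) :=
  if item = [] then d
  else
    let fmt := aFmt item
    let num := PySem.List.slice item (some ((fmt.length : Int))) none
    if num = [] ∨ ¬ (PySem.Chars.strIsdigit num = true) then d
    else if ¬ (d.contains fmt = true) then d.insert fmt num
    else d.insert fmt (pyMax2 (d.getD fmt []) num)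

def get_format_and_number (item_numbers : List String) : List (String × String) :=
  ((item_numbers.foldl (fun d s => aStep d s.toList) PySem.Dict.empty).items).map
    (fun p => (String.ofList p.1, String.ofList p.2))

-- ===== PORT B =====
-- the literal '0123456789' argument of B's rstrip
def pvDigits : List Char := ['0','1','2','3','4','5','6','7','8','9']

-- s.rstrip('0123456789'): PySem.Chars.rstrip is whitespace-only, so this is a hand port,
-- exact per CPython (drop the maximal trailing run of characters from the given set)
def bRstrip (cs : List Char) : List Char :=
  (List.dropWhile (fun c => pvDigits.contains c) cs.reverse).reverse

-- one iteration of B's pair-collecting loop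
def bPairStep (acc : List (List Char × List Char)) (s : String) :
    List (List Char × List Char) :=
  let cs := s.toList
  let pre := bRstrip cs
  if pre.length < cs.length then
    acc ++ [(pre, PySem.List.slice cs (some ((pre.length : Int))) none)]
  else acc

def bPairs (item_numbers : List String) : List (List Char × List Char) :=
  item_numbers.foldl bPairStep []

-- max(gen, key=lambda x: (len(x), x)) over one prefix's suffixes (never empty when called)
def bMax (v : List (List Char)) : List Char :=
  (PySem.List.max2? v (fun x => (x.length : Int)) (fun x => x)).getD []

def get_format_and_number_alt (item_numbers : List String) : List (String × String) :=
  let pairs := bPairs item_numbers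
  (PySem.List.dedup (pairs.map Prod.fst)).map
    (fun p => (String.ofList p,
               String.ofList (bMax ((pairs.filter (fun q => q.1 == p)).map Prod.snd))))

-- ===== PRECONDITION & SPEC =====
def Spec_get_format_and_number (item_numbers : List String) (out : List (String × String)) : Prop := out = get_format_and_number_alt item_numbers
instance (item_numbers : List String) (out : List (String × String)) : Decidable (Spec_get_format_and_number item_numbers out) := by unfold Spec_get_format_and_number; infer_instance

-- ===== CLAIM (what is proved, stated in full; the proofs are below) =====
def Claim_equal_get_format_and_number : Prop := ∀ (item_numbers : List String), Dom_get_format_and_number item_numbers → Spec_get_format_and_number item_numbers (get_format_and_number item_numbers)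

-- ===== LEMMAS AND PROOFS =====

-- the split point both programs compute: index of the first char of the trailing digit run
def bSplit (cs : List Char) : Nat → Nat
  | 0 => 0
  | i + 1 => if PySem.Chars.isdigit (PySem.List.pyGetD cs (i : Int) ' ') = true
             then bSplit cs i else i + 1

-- the per-item extraction both programs factor through: (prefix, digit-suffix), none if no digit-suffix
def pvExtract (cs : List Char) : Option (List Char × List Char) :=
  let k := bSplit cs cs.length
  if cs.drop k = [] then none else some (cs.take k, cs.drop k)

def pvStepA (d : PySem.Dict (List Char) (List Char)) (p : List Char × List Char) :
    PySem.Dict (List Char) (List Char) :=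
  if ¬ (d.contains p.1 = true) then d.insert p.1 p.2
  else d.insert p.1 (pyMax2 (d.getD p.1 []) p.2)

-- ---- facts about the split point ----

theorem bSplit_le (cs : List Char) : ∀ i, bSplit cs i ≤ i := by
  intro i
  induction i with
  | zero => simp [bSplit]
  | succ n ih =>
    simp only [bSplit]
    split
    · omega
    · omega

theorem bSplit_digits (cs : List Char) : ∀ i j, bSplit cs i ≤ j → j < i →
    PySem.Chars.isdigit (cs.getD j ' ') = true := by
  intro i
  induction i with
  | zero => intro j h1 h2; omega
  | succ n ih =>
    intro j hle hlt
    simp only [bSplit] at hle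
    by_cases hd : PySem.Chars.isdigit (PySem.List.pyGetD cs (n : Int) ' ') = true
    · simp only [hd, if_pos] at hle
      rcases Nat.lt_succ_iff_lt_or_eq.mp hlt with h | h
      · exact ih j hle h
      · subst h; simpa [PySem.List.pyGetD_natCast] using hd
    · rw [if_neg hd] at hle
      omega

theorem bSplit_stop (cs : List Char) : ∀ i, 0 < bSplit cs i →
    PySem.Chars.isdigit (cs.getD (bSplit cs i - 1) ' ') = false := by
  intro i
  induction i with
  | zero => simp [bSplit]
  | succ n ih =>
    intro hpos
    simp only [bSplit] at hpos ⊢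
    by_cases hd : PySem.Chars.isdigit (PySem.List.pyGetD cs (n : Int) ' ') = true
    · simp only [hd, if_pos] at hpos ⊢
      exact ih hpos
    · rw [if_neg hd]
      simp only [Nat.add_sub_cancel]
      simpa [PySem.List.pyGetD_natCast] using hd

-- ---- A's right-to-left scan finds exactly the split point ----

theorem aFindFmt_take (cs : List Char) (k : Nat) (hkpos : 0 < k)
    (hstop : PySem.Chars.isdigit (cs.getD (k - 1) ' ') = false)
    (hdig : ∀ j, k ≤ j → j < cs.length → PySem.Chars.isdigit (cs.getD j ' ') = true) :
    ∀ m, k ≤ m → m ≤ cs.length →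
      aFindFmt (PySem.List.pyRange ((m : Int) - 1) (-1) (-1)) cs = cs.take k := by
  intro m
  induction m with
  | zero => intro h _; omega
  | succ n ih =>
    intro hkm hmle
    have hcons : PySem.List.pyRange (((n + 1 : Nat) : Int) - 1) (-1) (-1)
        = ((n : Nat) : Int) :: PySem.List.pyRange (((n : Nat) : Int) - 1) (-1) (-1) := by
      have h1 : (-1 : Int) < ((n + 1 : Nat) : Int) - 1 := by push_cast; omega
      have := PySem.List.pyRange_neg_one_cons h1
      have h2 : ((n + 1 : Nat) : Int) - 1 = ((n : Nat) : Int) := by push_cast; ring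
      rw [h2] at this
      rw [h2, this]
    rw [hcons]
    simp only [aFindFmt, PySem.List.pyGetD_natCast]
    by_cases hkn : k = n + 1
    · have hnd : PySem.Chars.isdigit (cs.getD n ' ') = false := by
        have : k - 1 = n := by omega
        rw [this] at hstop; exact hstop
      rw [if_pos (by rw [hnd]; simp)]
      have h3 : ((n : Nat) : Int) + 1 = ((n + 1 : Nat) : Int) := by push_cast; ring
      rw [h3, PySem.List.slice_to_natCast, hkn]
    · have hkle : k ≤ n := by omega
      have hd : PySem.Chars.isdigit (cs.getD n ' ') = true := hdig n hkle (by omega)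
      rw [if_neg (by rw [hd]; simp)]
      exact ih hkle (by omega)

theorem aFmt_take (cs : List Char) (hnil : cs ≠ []) :
    aFmt cs = cs.take (bSplit cs cs.length) := by
  have hkle := bSplit_le cs cs.length
  unfold aFmt
  by_cases hall : PySem.Chars.strIsdigit cs = true
  · rw [if_pos hall]
    have hk0 : bSplit cs cs.length = 0 := by
      by_contra h
      have hpos : 0 < bSplit cs cs.length := Nat.pos_of_ne_zero h
      have hstop := bSplit_stop cs cs.length hpos
      have hlt : bSplit cs cs.length - 1 < cs.length := by omega
      have hmem : cs.getD (bSplit cs cs.length - 1) ' ' ∈ cs := by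
        rw [List.getD_eq_getElem _ _ hlt]
        exact List.getElem_mem _
      have hisd : cs.all PySem.Chars.isdigit = true := by
        simpa [PySem.Chars.strIsdigit, hnil] using hall
      have := List.all_eq_true.mp hisd _ hmem
      rw [this] at hstop
      exact Bool.noConfusion hstop
    rw [hk0]
    rfl
  · rw [if_neg hall]
    have hkpos : 0 < bSplit cs cs.length := by
      by_contra h
      have hk0 : bSplit cs cs.length = 0 := by omega
      have hisd : cs.all PySem.Chars.isdigit = true := by
        apply List.all_eq_true.mpr
        intro x hx
        obtain ⟨j, hj, rfl⟩ := List.mem_iff_getElem.mp hx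
        have := bSplit_digits cs cs.length j (by omega) hj
        rwa [List.getD_eq_getElem _ _ hj] at this
      have : PySem.Chars.strIsdigit cs = true := by
        simp [PySem.Chars.strIsdigit, hnil, hisd]
      exact hall this
    exact aFindFmt_take cs _ hkpos (bSplit_stop cs cs.length hkpos)
      (fun j h1 h2 => bSplit_digits cs cs.length j h1 h2) cs.length hkle le_rfl

-- the digit-suffix really is all digits
theorem drop_strIsdigit (cs : List Char) (h : bSplit cs cs.length < cs.length) :
    PySem.Chars.strIsdigit (cs.drop (bSplit cs cs.length)) = true := by
  have hne : cs.drop (bSplit cs cs.length) ≠ [] := by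
    simp [List.drop_eq_nil_iff]; omega
  have hall : (cs.drop (bSplit cs cs.length)).all PySem.Chars.isdigit = true := by
    apply List.all_eq_true.mpr
    intro x hx
    obtain ⟨j, hj, rfl⟩ := List.mem_iff_getElem.mp hx
    rw [List.getElem_drop]
    have hlt : bSplit cs cs.length + j < cs.length := by
      rw [List.length_drop] at hj
      omega
    have := bSplit_digits cs cs.length (bSplit cs cs.length + j) (by omega) hlt
    rwa [List.getD_eq_getElem _ _ hlt] at this
  simp [PySem.Chars.strIsdigit, hne, hall]

-- ---- A's loop body factors through pvExtract ----

theorem aStep_extract (d : PySem.Dict (List Char) (List Char)) (cs : List Char) :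
    aStep d cs = match pvExtract cs with
      | none => d
      | some p => pvStepA d p := by
  by_cases hnil : cs = []
  · subst hnil
    simp [aStep, pvExtract, bSplit]
  · have hkle := bSplit_le cs cs.length
    simp only [aStep, if_neg hnil, aFmt_take cs hnil]
    have hlen : (cs.take (bSplit cs cs.length)).length = bSplit cs cs.length := by
      simp [List.length_take]; omega
    rw [hlen, PySem.List.slice_from_natCast]
    by_cases hfull : bSplit cs cs.length = cs.length
    · have hdrop : cs.drop (bSplit cs cs.length) = [] := by
        simp [List.drop_eq_nil_iff]; omega
      rw [hdrop]
      simp [pvExtract, hdrop]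
    · have hlt : bSplit cs cs.length < cs.length := by omega
      have hdrop : cs.drop (bSplit cs cs.length) ≠ [] := by
        simp [List.drop_eq_nil_iff]; omega
      have hisd := drop_strIsdigit cs hlt
      rw [if_neg (by simp [hdrop, hisd])]
      simp only [pvExtract, if_neg hdrop]
      rfl

theorem foldA_filterMap (l : List (List Char)) : ∀ d,
    l.foldl aStep d = (l.filterMap pvExtract).foldl pvStepA d := by
  induction l with
  | nil => intro d; rfl
  | cons c t ih =>
    intro d
    simp only [List.foldl_cons, List.filterMap_cons, aStep_extract]
    cases h : pvExtract c with
    | none => simpa [h] using ih d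
    | some p => simpa [h] using ih (pvStepA d p)

-- ---- B's rstrip finds the same split point ----

theorem digits_contains (c : Char) : pvDigits.contains c = PySem.Chars.isdigit c := by
  rw [Bool.eq_iff_iff]
  simp only [pvDigits, List.contains_eq_mem, List.mem_cons, List.not_mem_nil, or_false,
    PySem.Chars.isdigit, Bool.and_eq_true, decide_eq_true_eq, Char.le_def,
    UInt32.le_iff_toNat_le, Char.ext_iff, UInt32.ext_iff,
    show ('0' : Char).val.toNat = 48 from rfl, show ('1' : Char).val.toNat = 49 from rfl,
    show ('2' : Char).val.toNat = 50 from rfl, show ('3' : Char).val.toNat = 51 from rfl,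
    show ('4' : Char).val.toNat = 52 from rfl, show ('5' : Char).val.toNat = 53 from rfl,
    show ('6' : Char).val.toNat = 54 from rfl, show ('7' : Char).val.toNat = 55 from rfl,
    show ('8' : Char).val.toNat = 56 from rfl, show ('9' : Char).val.toNat = 57 from rfl]
  omega

theorem bSplit_append (cs : List Char) (a : Char) :
    ∀ i, i ≤ cs.length → bSplit (cs ++ [a]) i = bSplit cs i := by
  intro i
  induction i with
  | zero => intro _; rfl
  | succ n ih =>
    intro h
    have hg : PySem.List.pyGetD (cs ++ [a]) (n : Int) ' ' = PySem.List.pyGetD cs (n : Int) ' ' := by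
      rw [PySem.List.pyGetD_natCast, PySem.List.pyGetD_natCast]
      rw [List.getD_append _ _ _ _ (by omega)]
    simp only [bSplit, hg]
    split
    · exact ih (by omega)
    · rfl

theorem bRstrip_take (cs : List Char) : bRstrip cs = cs.take (bSplit cs cs.length) := by
  induction cs using List.reverseRecOn with
  | nil => rfl
  | append_singleton cs a ih =>
    have hlen : (cs ++ [a]).length = cs.length + 1 := by simp
    have hget : PySem.List.pyGetD (cs ++ [a]) ((cs.length : Nat) : Int) ' ' = a := by
      rw [PySem.List.pyGetD_natCast]
      simp
    by_cases hd : PySem.Chars.isdigit a = true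
    · have hsplit : bSplit (cs ++ [a]) (cs ++ [a]).length = bSplit cs cs.length := by
        rw [hlen]
        simp only [bSplit, hget, hd, if_pos]
        exact bSplit_append cs a cs.length le_rfl
      have hpa : pvDigits.contains a = true := by rw [digits_contains]; exact hd
      have hdw : bRstrip (cs ++ [a]) = bRstrip cs := by
        unfold bRstrip
        rw [List.reverse_append]
        simp only [List.reverse_singleton, List.singleton_append, List.dropWhile_cons, hpa,
          if_pos]
      rw [hdw, ih, hsplit]
      rw [List.take_append_of_le_length (bSplit_le cs cs.length)]
    · have hsplit : bSplit (cs ++ [a]) (cs ++ [a]).length = cs.length + 1 := by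
        rw [hlen]
        simp only [bSplit, hget]
        simp [hd]
      have hmem : a ∉ pvDigits := by
        intro hm
        exact hd (by rw [← digits_contains]; simpa using hm)
      have hdw : bRstrip (cs ++ [a]) = cs ++ [a] := by
        unfold bRstrip
        rw [List.reverse_append]
        simp [hmem]
      rw [hdw, hsplit]
      rw [List.take_of_length_le (by simp)]

-- ---- B's pair collection equals filterMap pvExtract ----

theorem bPairItem (cs : List Char) (acc : List (List Char × List Char)) :
    (if (bRstrip cs).length < cs.length then
       acc ++ [(bRstrip cs, PySem.List.slice cs (some (((bRstrip cs).length : Int))) none)]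
     else acc) = acc ++ (pvExtract cs).toList := by
  have hkle := bSplit_le cs cs.length
  rw [bRstrip_take]
  have hlen : (cs.take (bSplit cs cs.length)).length = bSplit cs cs.length := by
    simp only [List.length_take]; omega
  rw [hlen, PySem.List.slice_from_natCast]
  by_cases hlt : bSplit cs cs.length < cs.length
  · have hdrop : cs.drop (bSplit cs cs.length) ≠ [] := by
      simp [List.drop_eq_nil_iff]; omega
    rw [if_pos hlt]
    simp [pvExtract, hdrop]
  · have hdrop : cs.drop (bSplit cs cs.length) = [] := by
      simp [List.drop_eq_nil_iff]; omega
    rw [if_neg hlt]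
    simp [pvExtract, hdrop]

theorem bPairStep_extract (s : String) (acc : List (List Char × List Char)) :
    bPairStep acc s = acc ++ (pvExtract s.toList).toList := by
  have := bPairItem s.toList acc
  simpa [bPairStep] using this

theorem bPairs_filterMap (l : List String) : ∀ acc,
    l.foldl bPairStep acc = acc ++ (l.map String.toList).filterMap pvExtract := by
  induction l with
  | nil => intro acc; simp
  | cons s t ih =>
    intro acc
    simp only [List.foldl_cons, List.map_cons, List.filterMap_cons, bPairStep_extract]
    cases h : pvExtract s.toList with
    | none => simpa [h] using ih acc
    | some p => simp [ih (acc ++ [p])]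

-- ---- lookups after A's fold: a running max over the group values ----

def pvRed (acc : Option (List Char)) (vs : List (List Char)) : Option (List Char) :=
  match acc, vs with
  | some a, vs => some (vs.foldl pyMax2 a)
  | none, [] => none
  | none, h :: t => some (t.foldl pyMax2 h)

theorem get?_foldA (k : List Char) (L : List (List Char × List Char)) :
    ∀ d, ((L.foldl pvStepA d).get? k)
      = pvRed (d.get? k) ((L.filter (fun p => p.1 == k)).map (fun p => p.2)) := by
  induction L with
  | nil =>
    intro d
    cases hd : d.get? k <;> simp [pvRed, hd]
  | cons p t ih =>
    intro d
    by_cases hpk : (p.1 == k) = true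
    · have hpk' : p.1 = k := by simpa using hpk
      simp only [List.foldl_cons, List.filter_cons, hpk, if_pos, List.map_cons]
      rw [ih (pvStepA d p)]
      cases hd : d.get? k with
      | none =>
        have hc : d.contains p.1 = false := by
          rw [PySem.Dict.contains_eq_isSome_get?, hpk', hd]; rfl
        have : (pvStepA d p).get? k = some p.2 := by
          unfold pvStepA
          rw [if_pos (by simp [hc]), hpk', PySem.Dict.get?_insert_self]
        rw [this]
        simp [pvRed]
      | some a =>
        have hc : d.contains p.1 = true := by
          rw [PySem.Dict.contains_eq_isSome_get?, hpk', hd]; rfl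
        have : (pvStepA d p).get? k = some (pyMax2 a p.2) := by
          unfold pvStepA
          rw [if_neg (by simp [hc]), hpk',
              PySem.Dict.getD_of_get?_eq_some _ _ hd, PySem.Dict.get?_insert_self]
        rw [this]
        simp [pvRed]
    · have hne : k ≠ p.1 := by
        intro h; subst h; simp at hpk
      have hstep : (pvStepA d p).get? k = d.get? k := by
        unfold pvStepA
        split
        · exact PySem.Dict.get?_insert_of_ne _ _ hne
        · exact PySem.Dict.get?_insert_of_ne _ _ hne
      simp only [List.foldl_cons, List.filter_cons, hpk]
      rw [ih (pvStepA d p), hstep]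
      simp

-- ---- B's keyed max of a nonempty group is the same running max ----

theorem max2?_step (a x : List Char) :
    (if (decide (((a.length : Nat) : Int) < ((x.length : Nat) : Int))
        || (!decide (((x.length : Nat) : Int) < ((a.length : Nat) : Int))
            && decide (a < x))) = true then some x else some a) = some (pyMax2 a x) := by
  unfold pyMax2
  rcases Nat.lt_trichotomy a.length x.length with h | h | h
  · rw [if_pos (by simp [h]), if_pos (Or.inl h)]
  · by_cases hlt : a < x
    · rw [if_pos (by simp [h, hlt]), if_pos (Or.inr ⟨h, hlt⟩)]
    · rw [if_neg (by simp [h, hlt]), if_neg (by simp [h, hlt])]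
  · rw [if_neg (by simp; omega), if_neg (by simp; omega)]

theorem max2?_cons (t : List (List Char)) : ∀ a,
    PySem.List.max2? (a :: t) (fun x => ((x.length : Nat) : Int)) (fun x => x)
      = some (t.foldl pyMax2 a) := by
  induction t with
  | nil => intro a; rfl
  | cons v t ih =>
    intro a
    have h1 := ih (pyMax2 a v)
    simp only [PySem.List.max2?, List.foldl_cons] at h1 ⊢
    rw [max2?_step a v]
    exact h1

theorem bMax_cons (h : List Char) (t : List (List Char)) :
    bMax (h :: t) = t.foldl pyMax2 h := by
  unfold bMax
  rw [max2?_cons t h]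
  rfl

-- ---- A's final dict items = one keyed max per distinct prefix ----

theorem pvStepA_eq_insert : pvStepA = fun d p =>
    d.insert p.1 (if d.contains p.1 = true then pyMax2 (d.getD p.1 []) p.2 else p.2) := by
  funext d p
  unfold pvStepA
  by_cases h : d.contains p.1 = true <;> simp [h]

theorem items_A (L : List (List Char × List Char)) :
    (L.foldl pvStepA PySem.Dict.empty).items
      = (PySem.Set.update ([] : List (List Char)) (L.map Prod.fst)).map
          (fun k => (k, bMax ((L.filter (fun q => q.1 == k)).map Prod.snd))) := by
  have hkeysA : (L.foldl pvStepA PySem.Dict.empty).keys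
      = PySem.Set.update ([] : List (List Char)) (L.map Prod.fst) := by
    rw [pvStepA_eq_insert]
    simpa using PySem.Dict.keys_foldl_insert_key L (fun p => p.1) _ PySem.Dict.empty
  have hndA : (L.foldl pvStepA PySem.Dict.empty).keys.Nodup := by
    rw [pvStepA_eq_insert]
    exact PySem.Dict.nodup_keys_foldl_insert_key L (fun p => p.1) _ _ PySem.Dict.nodup_keys_empty
  rw [PySem.Dict.items_eq_map_keys _ hndA [], hkeysA]
  apply List.map_congr_left
  intro k hk
  have hcont : (L.foldl pvStepA PySem.Dict.empty).contains k = true := by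
    rw [PySem.Dict.contains_iff_mem_keys, hkeysA]
    exact hk
  have hget? := get?_foldA k L PySem.Dict.empty
  rw [PySem.Dict.get?_empty] at hget?
  cases hvs : (L.filter (fun q => q.1 == k)).map Prod.snd with
  | nil =>
    exfalso
    rw [hvs] at hget?
    rw [PySem.Dict.contains_eq_isSome_get?, hget?] at hcont
    simp [pvRed] at hcont
  | cons h t =>
    rw [hvs] at hget?
    have : pvRed none (h :: t) = some (t.foldl pyMax2 h) := rfl
    rw [this] at hget?
    have hgA : (L.foldl pvStepA PySem.Dict.empty).getD k [] = t.foldl pyMax2 h :=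
      PySem.Dict.getD_of_get?_eq_some _ _ hget?
    rw [hgA, bMax_cons]

-- ===== VERDICT (by name: the statement is the Claim_ definition above) =====
theorem get_format_and_number_spec : Claim_equal_get_format_and_number := by
  intro l _
  unfold Spec_get_format_and_number get_format_and_number get_format_and_number_alt
  have hA : l.foldl (fun d s => aStep d s.toList) PySem.Dict.empty
      = (l.map String.toList).foldl aStep PySem.Dict.empty := by
    rw [List.foldl_map]
  have hB : bPairs l = (l.map String.toList).filterMap pvExtract := by
    unfold bPairs
    simpa using bPairs_filterMap l []
  rw [hA, foldA_filterMap, items_A, List.map_map]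
  simp only [hB, PySem.List.dedup_eq_ofList, PySem.Set.ofList_eq_foldl]
  rfl
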